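-- pv_equiv track=rewrite | github.com/lofthesaver/leetcode | 2226_maximum_candies_allocated_to_k_children.py | maximumCandies
-- ===== SOURCE A (Python) =====
-- def maximumCandies(candies, k: int) -> int:
--
--     # Idea: set min_k = 0 and max_k = max(candies),
--     # binary search for the maximum number
--
--     # For each k, determine maximum candies by checking whether there are at least
--     # k piles (for k children), where each pile has at least mid candies
--
--     left = 1
--     right = max(candies)
--     res = 0
--
--     while left <= right:
--         mid = (left + right) // 2
--
--         # Calculate number of piles with at least mid candies, including splits
--         tot = 0
--         for pile in candies:
--             tot += pile // mid
--
--         # If can allocate, then move right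
--         if tot >= k:
--             res = mid
--             left = mid + 1
--
--         else:
--             right = mid - 1
--
--     return res
-- ===== SOURCE B (Python) =====
-- def maximumCandies(candies, k: int) -> int:
--     # Descending linear scan: the first candies-per-child value that can serve
--     # k children is the maximum one (feasibility is monotone for nonneg piles).
--     for mid in range(max(candies), 0, -1):
--         if sum(pile // mid for pile in candies) >= k:
--             return mid
--     return 0
-- ===== Notes on version B (the rewrite author's own statement) =====
-- stated objective: simpler
-- what changed: Replaces the binary search (while-loop with left/right/res state) by a single descending linear scan that returns the first feasible candies-per-child value.
-- outside the precondition, e.g. on maximumCandies([9, -8], 0): A returns 4, B returns 9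
import Mathlib
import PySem

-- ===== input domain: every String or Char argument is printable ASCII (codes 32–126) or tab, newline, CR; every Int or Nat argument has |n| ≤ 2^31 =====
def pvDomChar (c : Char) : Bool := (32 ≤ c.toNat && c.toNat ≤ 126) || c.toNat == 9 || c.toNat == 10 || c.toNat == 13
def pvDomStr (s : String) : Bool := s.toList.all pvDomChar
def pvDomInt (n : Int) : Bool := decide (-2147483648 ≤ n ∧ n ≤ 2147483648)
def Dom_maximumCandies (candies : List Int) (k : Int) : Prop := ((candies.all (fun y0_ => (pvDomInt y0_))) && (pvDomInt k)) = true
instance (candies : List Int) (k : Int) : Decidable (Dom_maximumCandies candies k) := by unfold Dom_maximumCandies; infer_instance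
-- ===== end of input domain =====

-- B replaces A's binary search by a descending linear scan over candidate
-- candies-per-child values; equal on nonempty lists of nonnegative piles (objective: simpler).


-- ===== PORT A =====
-- the while-loop of A over its state (left, right, res)
def pvLoopA (candies : List Int) (k left right res : Int) : Int :=
  if h : left ≤ right then
    let mid := PySem.Int.floordiv (left + right) 2
    let tot := candies.foldl (fun tot pile => tot + PySem.Int.floordiv pile mid) 0
    if tot ≥ k then pvLoopA candies k (mid + 1) right mid
    else pvLoopA candies k left (mid - 1) res
  else res
termination_by (right + 1 - left).toNat
decreasing_by
  · have hb := PySem.Int.floordiv_two_mid_bounds h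
    omega
  · have hb := PySem.Int.floordiv_two_mid_bounds h
    omega

def maximumCandies (candies : List Int) (k : Int) : Int :=
  -- max(candies): Pre_ excludes [], where Python raises ValueError
  let right := (PySem.List.max? candies (fun x => x)).getD 0
  pvLoopA candies k 1 right 0

-- ===== PORT B =====
-- the for-loop of B: mid runs from max(candies) down to 1
def pvScanB (candies : List Int) (k mid : Int) : Int :=
  if h : 1 ≤ mid then
    if (candies.map (fun pile => PySem.Int.floordiv pile mid)).sum ≥ k then mid
    else pvScanB candies k (mid - 1)
  else 0
termination_by mid.toNat

def maximumCandies_alt (candies : List Int) (k : Int) : Int :=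
  pvScanB candies k ((PySem.List.max? candies (fun x => x)).getD 0)

-- ===== PRECONDITION & SPEC =====
-- Pre_ excludes the empty list (max() raises ValueError) and mixed-sign lists (a negative
-- next to a positive pile), which lie outside the problem's natural domain of candy-pile
-- sizes and on which the binary search's feasibility check is non-monotone, so A's value
-- there is an artefact of the search path (e.g. ([9, -8], 0): A returns 4, B returns 9).
def Pre_maximumCandies (candies : List Int) (k : Int) : Prop :=
  candies ≠ [] ∧ ((∀ x ∈ candies, 0 ≤ x) ∨ (∀ x ∈ candies, x ≤ 0))
instance (candies : List Int) (k : Int) : Decidable (Pre_maximumCandies candies k) := by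
  unfold Pre_maximumCandies; infer_instance

def pvWitness_maximumCandies : List Int × Int := ([5, 8], 3)

def Spec_maximumCandies (candies : List Int) (k : Int) (out : Int) : Prop :=
  out = maximumCandies_alt candies k
instance (candies : List Int) (k : Int) (out : Int) : Decidable (Spec_maximumCandies candies k out) := by
  unfold Spec_maximumCandies; infer_instance

-- ===== CLAIM (what is proved, stated in full; the proofs are below) =====
def Claim_equal_maximumCandies : Prop := ∀ (candies : List Int) (k : Int), Dom_maximumCandies candies k → Pre_maximumCandies candies k → Spec_maximumCandies candies k (maximumCandies candies k)

-- ===== LEMMAS AND PROOFS =====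

-- number of children servable with mid candies each (the quantity both loops test)
def pvTot (candies : List Int) (mid : Int) : Int :=
  (candies.map (fun pile => PySem.Int.floordiv pile mid)).sum

theorem pvFoldl_eq_tot (candies : List Int) (mid : Int) :
    candies.foldl (fun tot pile => tot + PySem.Int.floordiv pile mid) 0 = pvTot candies mid := by
  rw [PySem.List.foldl_add]; simp [pvTot]

theorem pvDiv_antitone (p a b : Int) (hp : 0 ≤ p) (ha : 1 ≤ a) (hab : a ≤ b) :
    PySem.Int.floordiv p b ≤ PySem.Int.floordiv p a := by
  rw [PySem.Int.floordiv_eq_ediv_of_pos (by omega), PySem.Int.floordiv_eq_ediv_of_pos (by omega)]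
  have h1 : 0 ≤ p / b := Int.ediv_nonneg hp (by omega)
  have h2 : (p / b) * a ≤ (p / b) * b := mul_le_mul_of_nonneg_left hab h1
  have h3 : (p / b) * b ≤ p := Int.ediv_mul_le p (by omega)
  exact (Int.le_ediv_iff_mul_le (by omega)).mpr (h2.trans h3)

theorem pvTot_antitone (candies : List Int) (hpos : ∀ x ∈ candies, 0 ≤ x)
    (a b : Int) (ha : 1 ≤ a) (hab : a ≤ b) : pvTot candies b ≤ pvTot candies a := by
  unfold pvTot
  apply List.sum_le_sum
  intro p hp
  exact pvDiv_antitone p a b (hpos p hp) ha hab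

-- B's scan returns res whenever res is "the answer": res is feasible (or 0) and
-- everything in (res, m] is infeasible.
theorem pvScanB_spec (candies : List Int) (k : Int) :
    ∀ (n : Nat) (m res : Int), m.toNat = n → 0 ≤ res → res ≤ m →
      (res = 0 ∨ (1 ≤ res ∧ pvTot candies res ≥ k)) →
      (∀ j : Int, res < j → j ≤ m → ¬ pvTot candies j ≥ k) →
      pvScanB candies k m = res := by
  intro n
  induction n using Nat.strong_induction_on with
  | _ n ih =>
    intro m res hn h0 hrm hres hinf
    rw [pvScanB]
    split_ifs with h1 h2
    · -- feasible at m: res must be m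
      by_contra hne
      exact hinf m (by omega) le_rfl h2
    · -- infeasible at m: recurse on m - 1
      have hresm : res ≠ m := by
        intro he
        rcases hres with h | ⟨_, hfeas⟩
        · omega
        · exact h2 (he ▸ hfeas)
      exact ih (m - 1).toNat (by omega) (m - 1) res (by omega) h0 (by omega) hres
        (fun j hj1 hj2 => hinf j hj1 (by omega))
    · -- m < 1: res = 0
      rcases hres with h | ⟨h, _⟩
      · omega
      · omega

-- A's binary search maintains: res = left - 1 is feasible (or 0) and everything in
-- (right, max0] is infeasible; at exit it returns exactly what B's scan from max0 returns.
theorem pvLoopA_spec (candies : List Int) (k max0 : Int) (hpos : ∀ x ∈ candies, 0 ≤ x) :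
    ∀ (n : Nat) (l r res : Int), (r + 1 - l).toNat = n →
      1 ≤ l → l ≤ r + 1 → r ≤ max0 → res = l - 1 →
      (res = 0 ∨ (1 ≤ res ∧ pvTot candies res ≥ k)) →
      (∀ j : Int, r < j → j ≤ max0 → ¬ pvTot candies j ≥ k) →
      pvLoopA candies k l r res = pvScanB candies k max0 := by
  intro n
  induction n using Nat.strong_induction_on with
  | _ n ih =>
    intro l r res hn hl hlr hrmax hres hfea hinf
    rw [pvLoopA]
    by_cases h : l ≤ r
    · simp only [dif_pos h, pvFoldl_eq_tot]
      have hb := PySem.Int.floordiv_two_mid_bounds h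
      set mid := PySem.Int.floordiv (l + r) 2 with hmid
      by_cases hfm : pvTot candies mid ≥ k
      · -- feasible at mid: move left up
        rw [if_pos hfm]
        exact ih (r + 1 - (mid + 1)).toNat (by omega) (mid + 1) r mid (by omega)
          (by omega) (by omega) hrmax (by omega) (Or.inr ⟨by omega, hfm⟩) hinf
      · -- infeasible at mid: move right down
        rw [if_neg hfm]
        refine ih (mid - 1 + 1 - l).toNat (by omega) l (mid - 1) res (by omega)
          hl (by omega) (by omega) hres hfea ?_
        intro j hj1 hj2
        by_cases hjr : r < j
        · exact hinf j hjr hj2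
        · -- mid ≤ j ≤ r : infeasibility propagates downward to mid
          intro hPj
          have := pvTot_antitone candies hpos mid j (by omega) (by omega)
          exact hfm (by omega)
    · -- loop exit: l = r + 1, hand over to the scan specification
      rw [dif_neg h]
      exact (pvScanB_spec candies k max0.toNat max0 res rfl (by omega) (by omega) hfea
        (fun j hj1 hj2 => hinf j (by omega) hj2)).symm

-- ===== VERDICT (by name: the statement is the Claim_ definition above) =====
theorem maximumCandies_spec : Claim_equal_maximumCandies := by
  intro candies k _ hpre
  obtain ⟨hne, hsign⟩ := hpre
  unfold Spec_maximumCandies maximumCandies maximumCandies_alt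
  cases hmax : PySem.List.max? candies (fun x => x) with
  | none => exact absurd ((PySem.List.max?_eq_none_iff candies (fun x => x)).mp hmax) hne
  | some m =>
    simp only [Option.getD_some]
    rcases hsign with hpos | hneg
    · have hm : 0 ≤ m := hpos m (PySem.List.max?_mem hmax)
      exact pvLoopA_spec candies k m hpos (m + 1 - 1).toNat 1 m 0 rfl (by omega)
        (by omega) le_rfl rfl (Or.inl rfl) (fun j hj1 hj2 => absurd (lt_of_lt_of_le hj1 hj2) (lt_irrefl m))
    · -- all piles ≤ 0: the loop guard 1 ≤ max and the scan guard fail at once, both return 0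
      have hm : m ≤ 0 := hneg m (PySem.List.max?_mem hmax)
      rw [pvLoopA, pvScanB]
      rw [dif_neg (by omega : ¬ (1 : Int) ≤ m), dif_neg (by omega : ¬ (1 : Int) ≤ m)]
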